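-- pv_equiv track=rewrite | github.com/D6C92FE5/oucSlidingBlock | slidingblock.py | heuristic_right_w_count
-- ===== SOURCE A (Python) =====
-- def heuristic_right_w_count(target_blocks, status, i, j):
--     """计算每个 B 块右侧 W 块数目的启发函数
--
--     来自 http://www.ics.uci.edu/~dechter/courses/ics-271/fall-08/homeworks/old/hw2-sol.pdf
--     """
--     right_w_count = len(target_blocks) // 2
--     heuristic = 0
--     for block in target_blocks:
--         if block == "B":
--             heuristic += max(0, right_w_count)
--         if block == "W":
--             right_w_count -= 1
--     return heuristic
-- ===== SOURCE B (Python) =====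
-- def heuristic_right_w_count(target_blocks, status, i, j):
--     m = len(target_blocks) // 2
--     # First pass: prefix table of W blocks seen strictly before each index.
--     w_before = []
--     c = 0
--     for block in target_blocks:
--         w_before.append(c)
--         if block == "W":
--             c += 1
--     # Second pass: consume the table.
--     return sum(max(0, m - w) for block, w in zip(target_blocks, w_before) if block == "B")
-- ===== Notes on version B (the rewrite author's own statement) =====
-- stated objective: alternative
-- what changed: Replaced the single fused stateful loop with a build-then-consume decomposition: a first pass builds a prefix table of W-counts seen before each index, a second pass sums max(0, m - w_before) over the B blocks.
import Mathlib
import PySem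

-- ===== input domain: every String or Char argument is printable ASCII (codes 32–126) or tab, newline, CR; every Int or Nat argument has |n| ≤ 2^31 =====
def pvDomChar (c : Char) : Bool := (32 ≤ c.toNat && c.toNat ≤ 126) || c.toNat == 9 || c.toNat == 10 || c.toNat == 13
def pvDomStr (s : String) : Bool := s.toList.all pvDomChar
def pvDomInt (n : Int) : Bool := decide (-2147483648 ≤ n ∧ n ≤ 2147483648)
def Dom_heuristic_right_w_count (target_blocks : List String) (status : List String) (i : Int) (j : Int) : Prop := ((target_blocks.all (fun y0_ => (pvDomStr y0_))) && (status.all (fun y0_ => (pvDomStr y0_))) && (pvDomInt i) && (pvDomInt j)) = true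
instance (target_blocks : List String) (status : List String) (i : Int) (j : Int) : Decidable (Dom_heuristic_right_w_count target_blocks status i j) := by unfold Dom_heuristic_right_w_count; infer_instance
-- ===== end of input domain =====

-- B replaces A's single fused stateful loop with a build-then-consume decomposition (prefix table of W-counts, then a sum over the B blocks); objective: alternative, same cost.


-- ===== PORT A =====
-- A: one fused loop on state (right_w_count, heuristic)
def pvStepA (s : Int × Int) (block : String) : Int × Int :=
  let s := if block == "B" then (s.1, s.2 + max 0 s.1) else s
  if block == "W" then (s.1 - 1, s.2) else s

def heuristic_right_w_count (target_blocks : List String) (status : List String) (i : Int) (j : Int) : Int :=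
  (target_blocks.foldl pvStepA (PySem.Int.floordiv (target_blocks.length : Int) 2, 0)).2

-- ===== PORT B =====
-- B helper: prefix table of W blocks seen strictly before each index
def pvWBefore : List String → Int → List Int
  | [], _ => []
  | block :: rest, c => c :: pvWBefore rest (if block == "W" then c + 1 else c)

-- B: build the prefix table, then sum max(0, m - w_before) over the B blocks
def heuristic_right_w_count_alt (target_blocks : List String) (status : List String) (i : Int) (j : Int) : Int :=
  let m := PySem.Int.floordiv (target_blocks.length : Int) 2
  let wb := pvWBefore target_blocks 0
  ((target_blocks.zip wb).filter (fun p => p.1 == "B")).foldl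
    (fun acc p => acc + max 0 (m - p.2)) 0

-- ===== PRECONDITION & SPEC =====
def Spec_heuristic_right_w_count (target_blocks : List String) (status : List String) (i : Int) (j : Int) (out : Int) : Prop := out = heuristic_right_w_count_alt target_blocks status i j
instance (target_blocks : List String) (status : List String) (i : Int) (j : Int) (out : Int) : Decidable (Spec_heuristic_right_w_count target_blocks status i j out) := by unfold Spec_heuristic_right_w_count; infer_instance

-- ===== CLAIM (what is proved, stated in full; the proofs are below) =====
def Claim_equal_heuristic_right_w_count : Prop := ∀ (target_blocks : List String) (status : List String) (i : Int) (j : Int), Dom_heuristic_right_w_count target_blocks status i j → Spec_heuristic_right_w_count target_blocks status i j (heuristic_right_w_count target_blocks status i j)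

-- ===== LEMMAS AND PROOFS =====

-- ===== VERDICT (by name: the statement is the Claim_ definition above) =====
-- common characterisation: sum over tb of max(0, current counter), counter decremented after each W
def pvG : List String → Int → Int
  | [], _ => 0
  | b :: t, r => (if b == "B" then max 0 r else 0) + pvG t (if b == "W" then r - 1 else r)

theorem pvA_fold (tb : List String) : ∀ (r h : Int),
    (tb.foldl pvStepA (r, h)).2 = h + pvG tb r := by
  induction tb with
  | nil => intro r h; simp [pvG]
  | cons b t ih =>
    intro r h
    rw [List.foldl_cons]
    by_cases hB : b == "B" <;> by_cases hW : b == "W"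
    · exact absurd (by simpa using hW) (by simp_all)
    · have hs : pvStepA (r, h) b = (r, h + max 0 r) := by simp [pvStepA, hB, hW]
      rw [hs, ih]
      simp [pvG, hB, hW]
      ring
    · have hs : pvStepA (r, h) b = (r - 1, h) := by simp [pvStepA, hB, hW]
      rw [hs, ih]
      simp [pvG, hB, hW]
    · have hs : pvStepA (r, h) b = (r, h) := by simp [pvStepA, hB, hW]
      rw [hs, ih]
      simp [pvG, hB, hW]

theorem pvB_fold (m : Int) (tb : List String) : ∀ (c acc : Int),
    ((tb.zip (pvWBefore tb c)).filter (fun p => p.1 == "B")).foldl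
      (fun acc p => acc + max 0 (m - p.2)) acc = acc + pvG tb (m - c) := by
  induction tb with
  | nil => intro c acc; simp [pvWBefore, pvG]
  | cons b t ih =>
    intro c acc
    simp only [pvWBefore, List.zip_cons_cons, List.filter_cons, pvG]
    by_cases hB : b == "B" <;> by_cases hW : b == "W"
    · exact absurd (by simpa using hW) (by simp_all)
    · simp [hB, hW, ih]
      ring_nf
    · have h1 : m - (c + 1) = m - c - 1 := by ring
      simp [hB, hW, ih, h1]
    · simp [hB, hW, ih]

theorem heuristic_right_w_count_spec : Claim_equal_heuristic_right_w_count := by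
  intro tb st i j _
  unfold Spec_heuristic_right_w_count heuristic_right_w_count heuristic_right_w_count_alt
  rw [pvA_fold, pvB_fold]
  simp
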